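-- pv_equiv track=rewrite | github.com/ValerieVienne/clairvoyant_stocks_sector | clairvoyant_app.py | detect_region
-- ===== SOURCE A (Python) =====
-- def detect_region(ticker: str) -> str:
--     """Detect region from ticker suffix."""
--     if ticker.endswith(".NS") or ticker.endswith(".BO"):
--         return "🇮🇳 India"
--     elif ticker.endswith(".HK"):
--         return "🇭🇰 Hong Kong"
--     elif any(ticker.endswith(s) for s in [".PA", ".AS", ".DE", ".L", ".SW", ".MC", ".MI", ".ST", ".OL"]):
--         return "🇪🇺 Europe"
--     elif any(ticker.endswith(s) for s in [".T", ".KS", ".TW", ".SS"]):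
--         return "🇯🇵🇰🇷 Asia"
--     else:
--         return "🇺🇸 US / Global"
-- ===== SOURCE B (Python) =====
-- _REGION_BY_EXT = {
--     "NS": "🇮🇳 India", "BO": "🇮🇳 India",
--     "HK": "🇭🇰 Hong Kong",
--     "PA": "🇪🇺 Europe", "AS": "🇪🇺 Europe", "DE": "🇪🇺 Europe",
--     "L": "🇪🇺 Europe", "SW": "🇪🇺 Europe", "MC": "🇪🇺 Europe",
--     "MI": "🇪🇺 Europe", "ST": "🇪🇺 Europe", "OL": "🇪🇺 Europe",
--     "T": "🇯🇵🇰🇷 Asia", "KS": "🇯🇵🇰🇷 Asia", "TW": "🇯🇵🇰🇷 Asia",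
--     "SS": "🇯🇵🇰🇷 Asia",
-- }
--
-- def detect_region(ticker: str) -> str:
--     """Detect region from ticker suffix."""
--     _, dot, ext = ticker.rpartition(".")
--     if not dot:
--         return "🇺🇸 US / Global"
--     return _REGION_BY_EXT.get(ext, "🇺🇸 US / Global")
-- ===== Notes on version B (the rewrite author's own statement) =====
-- stated objective: idiomatic
-- what changed: Instead of testing 16 endswith suffixes in a cascade, B parses the ticker once with rpartition on the dot to extract the extension after the last dot and does a single dict lookup keyed by extension (equivalent because every table suffix is a dot plus a dot-free extension).
import Mathlib
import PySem

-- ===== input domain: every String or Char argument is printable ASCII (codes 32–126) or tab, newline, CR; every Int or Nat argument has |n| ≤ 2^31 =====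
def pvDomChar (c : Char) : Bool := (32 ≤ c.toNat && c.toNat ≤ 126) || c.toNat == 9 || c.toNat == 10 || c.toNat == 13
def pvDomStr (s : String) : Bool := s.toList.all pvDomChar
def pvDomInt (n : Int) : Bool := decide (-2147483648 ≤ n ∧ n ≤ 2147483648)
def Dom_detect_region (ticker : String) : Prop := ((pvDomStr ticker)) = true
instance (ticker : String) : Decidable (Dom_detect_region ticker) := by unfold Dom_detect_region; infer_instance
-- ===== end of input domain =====

-- B replaces A's endswith cascade by parsing the extension after the last dot (rpartition) and one table lookup (idiomatic; same cost).


-- ===== PORT A =====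
def detect_region (ticker : String) : String :=
  if PySem.Str.endswith ticker ".NS" || PySem.Str.endswith ticker ".BO" then
    "🇮🇳 India"
  else if PySem.Str.endswith ticker ".HK" then
    "🇭🇰 Hong Kong"
  else if ([".PA", ".AS", ".DE", ".L", ".SW", ".MC", ".MI", ".ST", ".OL"].any
      (fun s => PySem.Str.endswith ticker s)) then
    "🇪🇺 Europe"
  else if ([".T", ".KS", ".TW", ".SS"].any (fun s => PySem.Str.endswith ticker s)) then
    "🇯🇵🇰🇷 Asia"
  else
    "🇺🇸 US / Global"

-- ===== PORT B =====
-- Source B's ticker.rpartition("."): the extension after the LAST '.', none if there is no dot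
def extAfterLastDot : List Char → Option (List Char)
  | [] => none
  | c :: rest =>
    match extAfterLastDot rest with
    | some e => some e
    | none => if c = '.' then some rest else none

-- Source B's _REGION_BY_EXT dict (insertion order; keys as char lists)
def regionByExt : List (List Char × String) :=
  [(['N','S'], "🇮🇳 India"), (['B','O'], "🇮🇳 India"),
   (['H','K'], "🇭🇰 Hong Kong"),
   (['P','A'], "🇪🇺 Europe"), (['A','S'], "🇪🇺 Europe"), (['D','E'], "🇪🇺 Europe"),
   (['L'], "🇪🇺 Europe"), (['S','W'], "🇪🇺 Europe"), (['M','C'], "🇪🇺 Europe"),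
   (['M','I'], "🇪🇺 Europe"), (['S','T'], "🇪🇺 Europe"), (['O','L'], "🇪🇺 Europe"),
   (['T'], "🇯🇵🇰🇷 Asia"), (['K','S'], "🇯🇵🇰🇷 Asia"), (['T','W'], "🇯🇵🇰🇷 Asia"),
   (['S','S'], "🇯🇵🇰🇷 Asia")]

def detect_region_alt (ticker : String) : String :=
  match extAfterLastDot ticker.toList with
  | none => "🇺🇸 US / Global"
  | some ext =>
    match regionByExt.find? (fun p => ext == p.1) with
    | some p => p.2
    | none => "🇺🇸 US / Global"

-- ===== PRECONDITION & SPEC =====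
def Spec_detect_region (ticker : String) (out : String) : Prop := out = detect_region_alt ticker
instance (ticker : String) (out : String) : Decidable (Spec_detect_region ticker out) := by unfold Spec_detect_region; infer_instance

-- ===== CLAIM (what is proved, stated in full; the proofs are below) =====
def Claim_equal_detect_region : Prop := ∀ (ticker : String), Dom_detect_region ticker → Spec_detect_region ticker (detect_region ticker)

-- ===== LEMMAS AND PROOFS =====
theorem extAfter_none_iff (l : List Char) : extAfterLastDot l = none ↔ '.' ∉ l := by
  induction l with
  | nil => simp [extAfterLastDot]
  | cons c rest ih =>
    simp only [extAfterLastDot]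
    cases hr : extAfterLastDot rest with
    | some e =>
      have hm : '.' ∈ rest := by
        by_contra hn
        simp [ih.2 hn] at hr
      simp [hm]
    | none =>
      have hnd : '.' ∉ rest := ih.1 hr
      by_cases hc : c = '.'
      · simp [hc]
      · simp [hc, hnd]
        exact fun hh => hc hh.symm

theorem extAfter_some (l e : List Char) (h : extAfterLastDot l = some e) :
    ('.' :: e) <:+ l ∧ '.' ∉ e := by
  induction l with
  | nil => simp [extAfterLastDot] at h
  | cons c rest ih =>
    simp only [extAfterLastDot] at h
    cases hr : extAfterLastDot rest with
    | some e' =>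
      rw [hr] at h
      obtain rfl : e' = e := by simpa using h
      obtain ⟨hs, hnd⟩ := ih hr
      exact ⟨hs.trans (List.suffix_cons c rest), hnd⟩
    | none =>
      rw [hr] at h
      by_cases hc : c = '.'
      · simp only [hc, if_true, Option.some.injEq] at h
        subst hc; subst h
        exact ⟨List.suffix_rfl, (extAfter_none_iff rest).1 hr⟩
      · simp [hc] at h

theorem extAfter_complete (l e : List Char) (hs : ('.' :: e) <:+ l) (hnd : '.' ∉ e) :
    extAfterLastDot l = some e := by
  induction l with
  | nil => simp at hs
  | cons c rest ih =>
    rcases List.suffix_cons_iff.1 hs with heq | hsuf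
    · obtain ⟨hc, hr⟩ := List.cons_eq_cons.mp heq
      subst hr
      simp [extAfterLastDot, (extAfter_none_iff _).2 hnd, ← hc]
    · have := ih hsuf
      simp [extAfterLastDot, this]

theorem endswith_dot_iff (l e cs : List Char) (h : extAfterLastDot l = some e) (hcs : '.' ∉ cs) :
    PySem.Chars.endswith l ('.' :: cs) = true ↔ e = cs := by
  constructor
  · intro hw
    have hsuf := (PySem.Chars.endswith_iff _ _).1 hw
    have := extAfter_complete l cs hsuf hcs
    rw [h] at this; simpa using this
  · rintro rfl
    exact (PySem.Chars.endswith_iff _ _).2 (extAfter_some l e h).1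

theorem endswith_dot_false (l cs : List Char) (h : extAfterLastDot l = none) :
    PySem.Chars.endswith l ('.' :: cs) = false := by
  rw [Bool.eq_false_iff]
  intro hw
  exact ((extAfter_none_iff l).1 h) (((PySem.Chars.endswith_iff _ _).1 hw).subset (by simp))

-- ===== VERDICT (by name: the statement is the Claim_ definition above) =====
theorem detect_region_spec : Claim_equal_detect_region := by
  intro t _
  unfold Spec_detect_region detect_region detect_region_alt
  cases h : extAfterLastDot t.toList with
  | none =>
    simp [PySem.Str.endswith, endswith_dot_false _ _ h]
  | some e =>
    have E : ∀ cs : List Char, '.' ∉ cs →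
        PySem.Chars.endswith t.toList ('.' :: cs) = (e == cs) := by
      intro cs hcs
      cases hb : (e == cs) with
      | true => exact (endswith_dot_iff t.toList e cs h hcs).2 (by simpa using hb)
      | false =>
        rw [Bool.eq_false_iff]
        intro hw
        exact absurd ((endswith_dot_iff t.toList e cs h hcs).1 hw) (by simpa using hb)
    simp only [PySem.Str.endswith, regionByExt, List.find?, List.any,
      show (".NS" : String).toList = ['.','N','S'] from rfl,
      show (".BO" : String).toList = ['.','B','O'] from rfl,
      show (".HK" : String).toList = ['.','H','K'] from rfl,
      show (".PA" : String).toList = ['.','P','A'] from rfl,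
      show (".AS" : String).toList = ['.','A','S'] from rfl,
      show (".DE" : String).toList = ['.','D','E'] from rfl,
      show (".L" : String).toList = ['.','L'] from rfl,
      show (".SW" : String).toList = ['.','S','W'] from rfl,
      show (".MC" : String).toList = ['.','M','C'] from rfl,
      show (".MI" : String).toList = ['.','M','I'] from rfl,
      show (".ST" : String).toList = ['.','S','T'] from rfl,
      show (".OL" : String).toList = ['.','O','L'] from rfl,
      show (".T" : String).toList = ['.','T'] from rfl,
      show (".KS" : String).toList = ['.','K','S'] from rfl,
      show (".TW" : String).toList = ['.','T','W'] from rfl,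
      show (".SS" : String).toList = ['.','S','S'] from rfl,
      E ['N','S'] (by decide), E ['B','O'] (by decide), E ['H','K'] (by decide),
      E ['P','A'] (by decide), E ['A','S'] (by decide), E ['D','E'] (by decide),
      E ['L'] (by decide), E ['S','W'] (by decide), E ['M','C'] (by decide),
      E ['M','I'] (by decide), E ['S','T'] (by decide), E ['O','L'] (by decide),
      E ['T'] (by decide), E ['K','S'] (by decide), E ['T','W'] (by decide),
      E ['S','S'] (by decide)]
    by_cases h1 : e = ['N','S']
    · simp [h1]
    by_cases h2 : e = ['B','O']
    · simp [h2]
    by_cases h3 : e = ['H','K']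
    · simp [h3]
    by_cases h4 : e = ['P','A']
    · simp [h4]
    by_cases h5 : e = ['A','S']
    · simp [h5]
    by_cases h6 : e = ['D','E']
    · simp [h6]
    by_cases h7 : e = ['L']
    · simp [h7]
    by_cases h8 : e = ['S','W']
    · simp [h8]
    by_cases h9 : e = ['M','C']
    · simp [h9]
    by_cases h10 : e = ['M','I']
    · simp [h10]
    by_cases h11 : e = ['S','T']
    · simp [h11]
    by_cases h12 : e = ['O','L']
    · simp [h12]
    by_cases h13 : e = ['T']
    · simp [h13]
    by_cases h14 : e = ['K','S']
    · simp [h14]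
    by_cases h15 : e = ['T','W']
    · simp [h15]
    by_cases h16 : e = ['S','S']
    · simp [h16]
    simp [beq_eq_false_iff_ne.mpr h1, beq_eq_false_iff_ne.mpr h2, beq_eq_false_iff_ne.mpr h3,
      beq_eq_false_iff_ne.mpr h4, beq_eq_false_iff_ne.mpr h5, beq_eq_false_iff_ne.mpr h6,
      beq_eq_false_iff_ne.mpr h7, beq_eq_false_iff_ne.mpr h8, beq_eq_false_iff_ne.mpr h9,
      beq_eq_false_iff_ne.mpr h10, beq_eq_false_iff_ne.mpr h11, beq_eq_false_iff_ne.mpr h12,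
      beq_eq_false_iff_ne.mpr h13, beq_eq_false_iff_ne.mpr h14, beq_eq_false_iff_ne.mpr h15,
      beq_eq_false_iff_ne.mpr h16]
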